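-- pv_equiv track=rewrite | github.com/eliottcassidy2000/math | 04-computation/da1_parity_analysis.py | compute_alphas
-- ===== SOURCE A (Python) =====
-- def compute_alphas(cycles):
--     alpha_1 = sum(cnt for _, cnt, _ in cycles)
--     alpha_2 = 0
--     for i in range(len(cycles)):
--         for j in range(i+1, len(cycles)):
--             if len(cycles[i][0] & cycles[j][0]) == 0:
--                 alpha_2 += cycles[i][1] * cycles[j][1]
--     return alpha_1, alpha_2
-- ===== SOURCE B (Python) =====
-- def compute_alphas(cycles):
--     alpha_1 = sum(c[1] for c in cycles)
--     ordered = sum(ci[1] * cj[1] for ci in cycles for cj in cycles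
--                   if not (ci[0] & cj[0]))
--     empty_self = sum(c[1] * c[1] for c in cycles if not c[0])
--     return alpha_1, (ordered - empty_self) // 2
-- ===== Notes on version B (the rewrite author's own statement) =====
-- stated objective: alternative
-- what changed: B replaces A's triangular i<j loop by a symmetric full double sum over all ordered pairs of cycles, then removes the self-pair contributions (nonzero only for empty sets) and halves the result.
import Mathlib
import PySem

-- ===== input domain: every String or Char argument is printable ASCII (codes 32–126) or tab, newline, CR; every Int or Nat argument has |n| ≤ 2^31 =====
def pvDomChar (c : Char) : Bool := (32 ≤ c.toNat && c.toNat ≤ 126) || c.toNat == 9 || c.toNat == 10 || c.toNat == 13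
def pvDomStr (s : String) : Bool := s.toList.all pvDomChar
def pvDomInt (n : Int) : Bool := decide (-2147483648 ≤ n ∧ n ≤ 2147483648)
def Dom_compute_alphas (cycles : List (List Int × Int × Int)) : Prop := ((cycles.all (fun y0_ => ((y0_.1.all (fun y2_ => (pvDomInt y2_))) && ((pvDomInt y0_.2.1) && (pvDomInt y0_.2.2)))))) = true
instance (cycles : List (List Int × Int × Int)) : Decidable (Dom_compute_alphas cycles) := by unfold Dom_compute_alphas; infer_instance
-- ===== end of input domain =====

-- B computes alpha_2 as the symmetric sum over ALL ordered pairs of disjoint cycles,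
-- corrects for self-pairs (empty sets) and halves it (objective: alternative decomposition).


-- ===== PORT A =====
-- len(cycles[i][0] & cycles[j][0]) == 0 : the number of common (distinct-set) elements is zero
def pvInterLenZero (a b : List Int) : Bool := (a.filter (fun x => b.contains x)).length == 0

-- 'for j in range(i+1, len(cycles))': the inner loop scans the cycles after position i
def pvLoopA : List (List Int × Int × Int) → Int → Int
  | [], acc => acc
  | c :: rest, acc =>
      pvLoopA rest
        (rest.foldl (fun a d => if pvInterLenZero c.1 d.1 then a + c.2.1 * d.2.1 else a) acc)

def compute_alphas (cycles : List (List Int × Int × Int)) : Int × Int :=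
  let alpha_1 := cycles.foldl (fun s c => s + c.2.1) 0
  let alpha_2 := pvLoopA cycles 0
  (alpha_1, alpha_2)

-- ===== PORT B =====
-- 'not (ci[0] & cj[0])': the intersection of the two sets is empty
def pvDisjoint (a b : List Int) : Bool := a.all (fun x => !(b.contains x))

def compute_alphas_alt (cycles : List (List Int × Int × Int)) : Int × Int :=
  let alpha_1 := (cycles.map (fun c => c.2.1)).sum
  let ordered := (cycles.map (fun ci =>
      (cycles.map (fun cj => if pvDisjoint ci.1 cj.1 then ci.2.1 * cj.2.1 else 0)).sum)).sum
  let empty_self := (cycles.map (fun c => if c.1.isEmpty then c.2.1 * c.2.1 else 0)).sum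
  (alpha_1, PySem.Int.floordiv (ordered - empty_self) 2)

-- ===== PRECONDITION & SPEC =====
def Spec_compute_alphas (cycles : List (List Int × Int × Int)) (out : Int × Int) : Prop := out = compute_alphas_alt cycles
instance (cycles : List (List Int × Int × Int)) (out : Int × Int) : Decidable (Spec_compute_alphas cycles out) := by unfold Spec_compute_alphas; infer_instance

-- ===== CLAIM (what is proved, stated in full; the proofs are below) =====
def Claim_equal_compute_alphas : Prop := ∀ (cycles : List (List Int × Int × Int)), Dom_compute_alphas cycles → Spec_compute_alphas cycles (compute_alphas cycles)

-- ===== LEMMAS AND PROOFS =====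

-- the pair term of B's double sum
def pvG (c d : List Int × Int × Int) : Int :=
  if pvDisjoint c.1 d.1 then c.2.1 * d.2.1 else 0

-- the triangular (i < j) disjoint-pair sum, A's quantity
def pvTri : List (List Int × Int × Int) → Int
  | [] => 0
  | c :: rest => (rest.map (pvG c)).sum + pvTri rest

theorem pvDisjoint_iff (a b : List Int) : pvDisjoint a b = true ↔ ∀ x ∈ a, x ∉ b := by
  unfold pvDisjoint; simp

theorem pvDisjoint_comm (a b : List Int) : pvDisjoint a b = pvDisjoint b a := by
  rw [Bool.eq_iff_iff, pvDisjoint_iff, pvDisjoint_iff]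
  constructor <;> intro h x hx hxb <;> exact h x hxb hx

theorem pvG_comm (c d : List Int × Int × Int) : pvG c d = pvG d c := by
  unfold pvG; rw [pvDisjoint_comm]; split <;> ring

theorem pvInterLenZero_eq (a b : List Int) : pvInterLenZero a b = pvDisjoint a b := by
  rw [Bool.eq_iff_iff, pvDisjoint_iff]
  unfold pvInterLenZero
  simp [List.length_eq_zero_iff, List.filter_eq_nil_iff]

theorem pvG_self (c : List Int × Int × Int) :
    pvG c c = if c.1.isEmpty then c.2.1 * c.2.1 else 0 := by
  unfold pvG
  rcases hc : c.1 with _ | ⟨x, xs⟩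
  · simp [pvDisjoint]
  · have hall : pvDisjoint (x :: xs) (x :: xs) = false := by
      apply List.all_eq_false.mpr
      exact ⟨x, by simp, by simp⟩
    simp [hall]

theorem pvSum_map_add (xs : List (List Int × Int × Int)) (f g : (List Int × Int × Int) → Int) :
    (xs.map (fun x => f x + g x)).sum = (xs.map f).sum + (xs.map g).sum := by
  induction xs with
  | nil => simp
  | cons x xs ih => simp [ih]; ring

-- A's inner row equals the corresponding map-sum of pvG
theorem pvInnerA (c : List Int × Int × Int) (rest : List (List Int × Int × Int)) (acc : Int) :
    rest.foldl (fun a d => if pvInterLenZero c.1 d.1 then a + c.2.1 * d.2.1 else a) acc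
      = acc + (rest.map (pvG c)).sum := by
  induction rest generalizing acc with
  | nil => simp
  | cons d rest ih =>
      simp only [List.foldl, List.map_cons, List.sum_cons]
      rw [ih]
      simp only [pvG, pvInterLenZero_eq]
      split <;> ring

theorem pvLoopA_eq (cycles : List (List Int × Int × Int)) (acc : Int) :
    pvLoopA cycles acc = acc + pvTri cycles := by
  induction cycles generalizing acc with
  | nil => simp [pvLoopA, pvTri]
  | cons c rest ih => simp only [pvLoopA, pvTri, ih, pvInnerA]; ring

-- the symmetric double sum equals twice the triangular sum plus the diagonal
theorem pvOrd_eq (cycles : List (List Int × Int × Int)) :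
    (cycles.map (fun ci => (cycles.map (pvG ci)).sum)).sum
      = 2 * pvTri cycles + (cycles.map (fun c => pvG c c)).sum := by
  induction cycles with
  | nil => simp [pvTri]
  | cons c rest ih =>
      simp only [List.map_cons, List.sum_cons, pvTri]
      rw [pvSum_map_add rest (fun ci => pvG ci c) (fun ci => (rest.map (pvG ci)).sum)]
      have hsym : (rest.map (fun ci => pvG ci c)).sum = (rest.map (pvG c)).sum :=
        congrArg List.sum (List.map_congr_left (fun ci _ => pvG_comm ci c))
      rw [hsym, ih]
      ring

theorem pvFoldl_sum (cycles : List (List Int × Int × Int)) (a : Int) :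
    cycles.foldl (fun s c => s + c.2.1) a = a + (cycles.map (fun c => c.2.1)).sum := by
  induction cycles generalizing a with
  | nil => simp
  | cons c rest ih => simp [List.foldl, ih]; ring

-- ===== VERDICT (by name: the statement is the Claim_ definition above) =====
theorem compute_alphas_spec : Claim_equal_compute_alphas := by
  intro cycles _
  unfold Spec_compute_alphas compute_alphas compute_alphas_alt
  have hOrd : (cycles.map (fun ci =>
      (cycles.map (fun cj => if pvDisjoint ci.1 cj.1 then ci.2.1 * cj.2.1 else 0)).sum)).sum
      = 2 * pvTri cycles + (cycles.map (fun c => pvG c c)).sum := pvOrd_eq cycles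
  have hdiag : (cycles.map (fun c => if c.1.isEmpty then c.2.1 * c.2.1 else 0)).sum
      = (cycles.map (fun c => pvG c c)).sum :=
    congrArg List.sum (List.map_congr_left (fun c _ => (pvG_self c).symm))
  simp only [pvFoldl_sum, zero_add, pvLoopA_eq, hOrd, hdiag]
  have h2 : 2 * pvTri cycles + (cycles.map (fun c => pvG c c)).sum
      - (cycles.map (fun c => pvG c c)).sum = 2 * pvTri cycles := by ring
  rw [h2, PySem.Int.floordiv_eq_ediv_of_pos (by omega)]
  refine Prod.ext rfl ?_
  show pvTri cycles = 2 * pvTri cycles / 2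
  omega
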